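-- pv_equiv track=rewrite | github.com/the-zebulan/CodeWars | Beta/comfortable_words.py | comfortable_word
-- ===== SOURCE A (Python) =====
-- LEFT = set('qwertasdfgzxcvb')
--
-- RIGHT = set('yuiophjklnm')
--
-- def comfortable_word(word):
--     one = []
--     two = []
--     for i, a in enumerate(word):
--         if not i % 2:
--             one.append(a)
--         else:
--             two.append(a)
--     one = ''.join(one)
--     two = ''.join(two)
--     return LEFT.issuperset(one) and RIGHT.issuperset(two) or \
--         LEFT.issuperset(two) and RIGHT.issuperset(one)
-- ===== SOURCE B (Python) =====
-- LEFT = set('qwertasdfgzxcvb')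
--
-- RIGHT = set('yuiophjklnm')
--
-- def comfortable_word(word):
--     prev = None
--     for ch in word:
--         if ch in LEFT:
--             side = True
--         elif ch in RIGHT:
--             side = False
--         else:
--             return False
--         if side == prev:
--             return False
--         prev = side
--     return True
-- ===== Notes on version B (the rewrite author's own statement) =====
-- stated objective: simpler
-- what changed: Replaces the even/odd index partition into two joined strings plus four set-superset checks by a single adjacency scan that tracks the previous character's keyboard side and exits early on a repeated side or an unknown character.
import Mathlib
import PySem

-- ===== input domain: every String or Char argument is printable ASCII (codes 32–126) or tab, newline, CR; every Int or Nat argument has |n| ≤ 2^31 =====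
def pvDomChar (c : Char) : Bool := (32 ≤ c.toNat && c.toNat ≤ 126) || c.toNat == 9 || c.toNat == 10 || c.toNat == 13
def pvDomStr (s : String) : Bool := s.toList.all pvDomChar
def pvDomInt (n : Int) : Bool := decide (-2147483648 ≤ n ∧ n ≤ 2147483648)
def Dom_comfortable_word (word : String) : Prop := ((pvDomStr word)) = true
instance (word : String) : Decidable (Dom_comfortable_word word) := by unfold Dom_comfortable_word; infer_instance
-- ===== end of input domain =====

-- B replaces the even/odd-index partition plus four set-superset checks by a single
-- adjacency scan tracking the previous character's keyboard side (simpler; same cost).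

-- ===== PORT A =====
-- LEFT = set('qwertasdfgzxcvb')  (the string literal written out as its characters)
def pvLEFT : PySem.Set Char :=
  PySem.Set.ofList ['q', 'w', 'e', 'r', 't', 'a', 's', 'd', 'f', 'g', 'z', 'x', 'c', 'v', 'b']

-- RIGHT = set('yuiophjklnm')
def pvRIGHT : PySem.Set Char :=
  PySem.Set.ofList ['y', 'u', 'i', 'o', 'p', 'h', 'j', 'k', 'l', 'n', 'm']

def comfortable_word (word : String) : Bool :=
  -- for i, a in enumerate(word): even indices appended to `one`, odd to `two`
  let st := (PySem.List.enumerate word.toList).foldl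
    (fun (ot : List Char × List Char) (p : Int × Char) =>
      if PySem.Int.mod p.1 2 == 0 then (ot.1 ++ [p.2], ot.2) else (ot.1, ot.2 ++ [p.2]))
    ([], [])
  let one := st.1   -- ''.join(one): kept as its list of characters; issuperset below iterates exactly these characters
  let two := st.2   -- ''.join(two)
  (pvLEFT.issuperset one && pvRIGHT.issuperset two) ||
    (pvLEFT.issuperset two && pvRIGHT.issuperset one)

-- ===== PORT B =====
-- the loop of Source B: `prev` is the previous character's side (none before the first char)
def pvAltGo (prev : Option Bool) : List Char → Bool
  | [] => true
  | c :: rest =>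
    if pvLEFT.contains c then
      if prev == some true then false else pvAltGo (some true) rest
    else if pvRIGHT.contains c then
      if prev == some false then false else pvAltGo (some false) rest
    else false

def comfortable_word_alt (word : String) : Bool := pvAltGo none word.toList

-- ===== PRECONDITION & SPEC =====
def Spec_comfortable_word (word : String) (out : Bool) : Prop := out = comfortable_word_alt word
instance (word : String) (out : Bool) : Decidable (Spec_comfortable_word word out) := by unfold Spec_comfortable_word; infer_instance

-- ===== CLAIM (what is proved, stated in full; the proofs are below) =====
def Claim_equal_comfortable_word : Prop := ∀ (word : String), Dom_comfortable_word word → Spec_comfortable_word word (comfortable_word word)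

-- ===== LEMMAS AND PROOFS =====

-- characters at even / odd positions of a list
mutual
def pvEvens : List Char → List Char
  | [] => []
  | c :: l => c :: pvOdds l
def pvOdds : List Char → List Char
  | [] => []
  | _ :: l => pvEvens l
end

theorem pv_disjLR : ∀ c ∈ pvLEFT, c ∉ pvRIGHT := by
  intro c hc hr
  simp only [pvLEFT, pvRIGHT, PySem.Set.mem_ofList, List.mem_cons, List.not_mem_nil,
    or_false] at hc hr
  rcases hc with rfl | rfl | rfl | rfl | rfl | rfl | rfl | rfl | rfl | rfl | rfl | rfl |
    rfl | rfl | rfl <;> simp at hr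

theorem pv_fold_eq (l : List Char) : ∀ (s : Int) (acc : List Char × List Char),
    (PySem.List.enumerate l s).foldl
      (fun (ot : List Char × List Char) (p : Int × Char) =>
        if PySem.Int.mod p.1 2 == 0 then (ot.1 ++ [p.2], ot.2) else (ot.1, ot.2 ++ [p.2])) acc
    = if PySem.Int.mod s 2 == 0 then (acc.1 ++ pvEvens l, acc.2 ++ pvOdds l)
      else (acc.1 ++ pvOdds l, acc.2 ++ pvEvens l) := by
  induction l with
  | nil =>
    intro s acc
    simp [PySem.List.enumerate_nil, pvEvens, pvOdds]
  | cons c l ih =>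
    intro s acc
    rw [PySem.List.enumerate_cons, List.foldl_cons, ih (s + 1)]
    by_cases h : s % 2 = 0
    · have h1 : (s + 1) % 2 = 1 := by omega
      simp [h, h1, pvEvens, pvOdds, List.append_assoc]
    · have h0 : s % 2 = 1 := by omega
      have h1 : (s + 1) % 2 = 0 := by omega
      simp [h0, h1, pvEvens, pvOdds, List.append_assoc]

theorem pv_sup_nil (s : PySem.Set Char) : s.issuperset ([] : List Char) = true := by
  rw [PySem.Set.issuperset_iff]; intro x hx; cases hx

theorem pv_sup_cons (s : PySem.Set Char) (c : Char) (t : List Char) :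
    s.issuperset (c :: t) = (decide (c ∈ s) && s.issuperset t) := by
  by_cases hc : c ∈ s
  · by_cases ht : s.issuperset t = true
    · have h : s.issuperset (c :: t) = true := by
        rw [PySem.Set.issuperset_iff]
        intro x hx
        rcases List.mem_cons.mp hx with rfl | hx
        · exact hc
        · exact (PySem.Set.issuperset_iff s t).mp ht x hx
      simp [h, ht, hc]
    · have ht' : s.issuperset t = false := by
        cases hs : s.issuperset t
        · rfl
        · exact absurd hs ht
      have h : s.issuperset (c :: t) = false := by
        cases hs : s.issuperset (c :: t)
        · rfl
        · exact absurd ((PySem.Set.issuperset_iff s t).mpr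
            (fun x hx => (PySem.Set.issuperset_iff s (c :: t)).mp hs x (List.mem_cons_of_mem c hx))) ht
      simp [h, ht', hc]
  · have h : s.issuperset (c :: t) = false := by
      cases hs : s.issuperset (c :: t)
      · rfl
      · exact absurd ((PySem.Set.issuperset_iff s (c :: t)).mp hs c List.mem_cons_self) hc
    simp [h, hc]

theorem pv_altGo_eq (l : List Char) :
    pvAltGo (some true) l = (pvRIGHT.issuperset (pvEvens l) && pvLEFT.issuperset (pvOdds l)) ∧
    pvAltGo (some false) l = (pvLEFT.issuperset (pvEvens l) && pvRIGHT.issuperset (pvOdds l)) := by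
  induction l with
  | nil => simp [pvAltGo, pvEvens, pvOdds, pv_sup_nil]
  | cons c l ih =>
    by_cases hL : c ∈ pvLEFT
    · have hR : c ∉ pvRIGHT := pv_disjLR c hL
      constructor
      · simp [pvAltGo, pvEvens, pvOdds, pv_sup_cons, hL, hR]
      · simp [pvAltGo, pvEvens, pvOdds, pv_sup_cons, hL, ih.1, Bool.and_comm]
    · by_cases hR : c ∈ pvRIGHT
      · constructor
        · simp [pvAltGo, pvEvens, pvOdds, pv_sup_cons, hL, hR, ih.2, Bool.and_comm]
        · simp [pvAltGo, pvEvens, pvOdds, pv_sup_cons, hL, hR]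
      · constructor
        · simp [pvAltGo, pvEvens, pvOdds, pv_sup_cons, hL, hR]
        · simp [pvAltGo, pvEvens, pvOdds, pv_sup_cons, hL, hR]

theorem pv_main (l : List Char) :
    ((pvLEFT.issuperset (pvEvens l) && pvRIGHT.issuperset (pvOdds l)) ||
      (pvLEFT.issuperset (pvOdds l) && pvRIGHT.issuperset (pvEvens l))) = pvAltGo none l := by
  cases l with
  | nil => simp [pvAltGo, pvEvens, pvOdds, pv_sup_nil]
  | cons c l =>
    by_cases hL : c ∈ pvLEFT
    · have hR : c ∉ pvRIGHT := pv_disjLR c hL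
      simp [pvAltGo, pvEvens, pvOdds, pv_sup_cons, hL, hR, (pv_altGo_eq l).1, Bool.and_comm]
    · by_cases hR : c ∈ pvRIGHT
      · simp [pvAltGo, pvEvens, pvOdds, pv_sup_cons, hL, hR, (pv_altGo_eq l).2]
      · simp [pvAltGo, pvEvens, pvOdds, pv_sup_cons, hL, hR]

-- ===== VERDICT (by name: the statement is the Claim_ definition above) =====
theorem comfortable_word_spec : Claim_equal_comfortable_word := by
  intro word _
  show comfortable_word word = comfortable_word_alt word
  unfold comfortable_word comfortable_word_alt
  rw [pv_fold_eq word.toList 0 ([], [])]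
  simpa [PySem.Int.mod] using pv_main word.toList
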